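-- pv_equiv track=rewrite | github.com/shlomog12/research-algorithms | home_works/hw7/q3.py | n_chose_c
-- ===== SOURCE A (Python) =====
-- def n_chose_c(c,n):
--     if c > n:
--         return 0
--     if c == n:
--         return 1
--     if c == 0:
--         return 9**n
--     ans = 9*n_chose_c(c,n-1)
--     ans += n_chose_c(c-1,n-1)
--     return ans
-- ===== SOURCE B (Python) =====
-- def n_chose_c(c, n):
--     if c > n:
--         return 0
--     if c == n:
--         return 1
--     b = 1
--     for i in range(c):
--         b = b * (n - i) // (i + 1)
--     return b * 9 ** (n - c)
-- ===== Notes on version B (the rewrite author's own statement) =====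
-- stated objective: alternative
-- what changed: Replaces the exponential two-branch recursion with the closed form C(n,c)*9^(n-c), computing the binomial coefficient by a single multiplicative loop of c exact-division steps.
import Mathlib
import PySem

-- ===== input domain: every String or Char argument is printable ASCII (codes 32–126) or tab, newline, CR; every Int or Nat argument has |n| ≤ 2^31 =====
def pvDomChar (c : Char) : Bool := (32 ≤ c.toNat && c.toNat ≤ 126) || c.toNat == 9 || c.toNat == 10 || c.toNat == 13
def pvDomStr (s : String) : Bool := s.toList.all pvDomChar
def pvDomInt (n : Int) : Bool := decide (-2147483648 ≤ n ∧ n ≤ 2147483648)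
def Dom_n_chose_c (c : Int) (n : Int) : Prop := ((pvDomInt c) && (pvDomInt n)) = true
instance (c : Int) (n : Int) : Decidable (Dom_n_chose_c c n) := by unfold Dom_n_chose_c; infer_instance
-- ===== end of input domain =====

-- B replaces A's two-branch recursion by the closed form C(n,c)*9^(n-c)
-- (binomial computed by a single multiplicative loop): a different algorithm.


-- ===== PORT A =====
-- A's recursion does not terminate for c < 0 ∧ c < n (Python: RecursionError), so the
-- port is fuelled; on Pre_ the fuel n.toNat + 1 is provably sufficient (lemma below),
-- making the port a literal transcription of A's code wherever A returns.
-- At the `c = 0` branch Python's 9**n is reached only with n > 0, so 9 ^ n.toNat is exact there.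
def nChoseCGo : Nat → Int → Int → Int
  | 0, _, _ => 0
  | fuel+1, c, n =>
    if c > n then 0
    else if c = n then 1
    else if c = 0 then 9 ^ n.toNat
    else 9 * nChoseCGo fuel c (n-1) + nChoseCGo fuel (c-1) (n-1)

def n_chose_c (c : Int) (n : Int) : Int := nChoseCGo (n.toNat + 1) c n

-- ===== PORT B =====
-- `b * (n - i) // (i + 1)` with Python floor division; `9 ** (n - c)` is reached only
-- with c < n, so the exponent n - c is positive and (n - c).toNat is exact.
def n_chose_c_alt (c : Int) (n : Int) : Int :=
  if c > n then 0
  else if c = n then 1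
  else
    ((List.range c.toNat).foldl
        (fun (b : Int) (i : Nat) => PySem.Int.floordiv (b * (n - (i : Int))) ((i : Int) + 1)) 1)
      * 9 ^ (n - c).toNat

-- ===== PRECONDITION & SPEC =====
-- Pre_ excludes exactly the inputs with c < 0 and c < n, on which Python A recurses
-- forever (RecursionError); A returns normally on every input admitted here.
def Pre_n_chose_c (c : Int) (n : Int) : Prop := 0 ≤ c ∨ n ≤ c
instance (c : Int) (n : Int) : Decidable (Pre_n_chose_c c n) := by unfold Pre_n_chose_c; infer_instance
def pvWitness_n_chose_c : Int × Int := (3, 7)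

def Spec_n_chose_c (c : Int) (n : Int) (out : Int) : Prop := out = n_chose_c_alt c n
instance (c : Int) (n : Int) (out : Int) : Decidable (Spec_n_chose_c c n out) := by unfold Spec_n_chose_c; infer_instance

-- ===== CLAIM (what is proved, stated in full; the proofs are below) =====
def Claim_equal_n_chose_c : Prop := ∀ (c : Int) (n : Int), Dom_n_chose_c c n → Pre_n_chose_c c n → Spec_n_chose_c c n (n_chose_c c n)

-- ===== LEMMAS AND PROOFS =====

-- the common closed form both ports are reduced to
def nChoseCCF (c : Int) (n : Int) : Int :=
  if n < c then 0 else (Nat.choose n.toNat c.toNat : Int) * 9 ^ (n - c).toNat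

-- the binomial loop computes the binomial coefficient
theorem nChoseCFold (n : Int) (j : Nat) (hj : (j : Int) ≤ n) :
    (List.range j).foldl
        (fun (b : Int) (i : Nat) => PySem.Int.floordiv (b * (n - (i : Int))) ((i : Int) + 1)) 1
      = (Nat.choose n.toNat j : Int) := by
  induction j with
  | zero => simp
  | succ j ih =>
    have hj' : (j : Int) ≤ n := by push_cast at hj ⊢; omega
    have hjN : j < n.toNat := by omega
    rw [List.range_succ, List.foldl_append, ih hj']
    simp only [List.foldl_cons, List.foldl_nil]
    have hsub : n - (j : Int) = ((n.toNat - j : Nat) : Int) := by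
      push_cast [Nat.cast_sub (le_of_lt hjN)]; omega
    rw [hsub]
    have : (Nat.choose n.toNat j : Int) * ((n.toNat - j : Nat) : Int)
        = ((Nat.choose n.toNat j * (n.toNat - j) : Nat) : Int) := by push_cast; ring
    rw [this]
    have hdiv : PySem.Int.floordiv ((Nat.choose n.toNat j * (n.toNat - j) : Nat) : Int) ((j : Int) + 1)
        = ((Nat.choose n.toNat j * (n.toNat - j) / (j + 1) : Nat) : Int) := by
      simp
    rw [hdiv]
    congr 1
    have hrec : Nat.choose n.toNat (j + 1) * (j + 1) = Nat.choose n.toNat j * (n.toNat - j) :=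
      Nat.choose_succ_right_eq n.toNat j
    rw [← hrec, Nat.mul_div_cancel _ (Nat.succ_pos j)]

-- with sufficient fuel, A's recursion equals the closed form on Pre_
theorem nChoseCGo_eq_CF : ∀ (fuel : Nat) (c n : Int), Pre_n_chose_c c n → n.toNat < fuel →
    nChoseCGo fuel c n = nChoseCCF c n := by
  intro fuel
  induction fuel with
  | zero => intro c n _ h; omega
  | succ fuel ih =>
    intro c n hpre hf
    unfold nChoseCGo nChoseCCF
    by_cases h1 : c > n
    · simp [h1]
    · by_cases h2 : c = n
      · subst h2; simp
      · by_cases h3 : c = 0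
        · subst h3
          have hn : 0 < n := by omega
          simp [h1, h2, Int.toNat_zero, Nat.choose_zero_right]
        · -- recursive case: 1 ≤ c < n
          have hc1 : 1 ≤ c := by
            rcases hpre with h | h
            · omega
            · omega
          have hcn : c < n := by omega
          simp only [h1, h2, h3, if_false]
          have hf1 : (n - 1).toNat < fuel := by omega
          have hp1 : Pre_n_chose_c c (n - 1) := Or.inl (by omega)
          have hp2 : Pre_n_chose_c (c - 1) (n - 1) := Or.inl (by omega)
          rw [ih c (n - 1) hp1 hf1, ih (c - 1) (n - 1) hp2 hf1]
          unfold nChoseCCF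
          rw [if_neg (by omega : ¬ n - 1 < c), if_neg (by omega : ¬ n - 1 < c - 1)]
          -- pass to Nat: N = n.toNat, k = c.toNat with 1 ≤ k < N
          obtain ⟨N, rfl⟩ : ∃ N : Nat, n = (N : Int) := ⟨n.toNat, by omega⟩
          obtain ⟨k, rfl⟩ : ∃ k : Nat, c = (k : Int) := ⟨c.toNat, by omega⟩
          have hkN : k < N := by exact_mod_cast hcn
          have hk1 : 1 ≤ k := by exact_mod_cast hc1
          have e1 : ((N : Int) - 1).toNat = N - 1 := by omega
          have e2 : ((N : Int) - 1 - k).toNat = N - 1 - k := by omega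
          have e3 : ((N : Int) - 1 - ((k : Int) - 1)).toNat = N - k := by omega
          have e4 : ((N : Int) - k).toNat = N - k := by omega
          have e5 : ((k : Int) - 1).toNat = k - 1 := by omega
          rw [e1, e2, e3, e4, e5, Int.toNat_natCast, Int.toNat_natCast]
          have hpascal : Nat.choose N k = Nat.choose (N - 1) (k - 1) + Nat.choose (N - 1) k := by
            have := Nat.choose_succ_succ (N - 1) (k - 1)
            have hN : N - 1 + 1 = N := by omega
            have hk : k - 1 + 1 = k := by omega
            simpa [Nat.succ_eq_add_one, hN, hk] using this
          have hpow : (9 : Int) ^ (N - k) = 9 * 9 ^ (N - 1 - k) := by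
            have : N - k = (N - 1 - k) + 1 := by omega
            rw [this, pow_succ]; ring
          rw [hpascal, hpow]
          push_cast
          ring

-- B equals the closed form on Pre_
theorem nChoseCAlt_eq_CF (c n : Int) (hpre : Pre_n_chose_c c n) :
    n_chose_c_alt c n = nChoseCCF c n := by
  unfold n_chose_c_alt nChoseCCF
  by_cases h1 : c > n
  · simp [h1]
  · by_cases h2 : c = n
    · subst h2; simp
    · have hcn : c < n := by omega
      have hc0 : 0 ≤ c := by
        rcases hpre with h | h
        · exact h
        · omega
      rw [if_neg h1, if_neg h2, if_neg (by omega : ¬ n < c)]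
      rw [nChoseCFold n c.toNat (by omega)]

-- ===== VERDICT (by name: the statement is the Claim_ definition above) =====
theorem n_chose_c_spec : Claim_equal_n_chose_c := by
  intro c n _ hpre
  unfold Spec_n_chose_c n_chose_c
  rw [nChoseCGo_eq_CF (n.toNat + 1) c n hpre (by omega), nChoseCAlt_eq_CF c n hpre]
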